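-- pv_equiv track=rewrite | github.com/chernistry/shafi | src/rag_challenge/core/pipeline/answer_validator.py | _find_term_windows
-- ===== SOURCE A (Python) =====
-- def _find_term_windows(
--     source_text: str,
--     terms: list[str],
--     window_size: int = 50,
-- ) -> list[str]:
--     """Find text windows around occurrences of key terms in source text.
--
--     Returns windows of ±window_size words around each term occurrence.
--     """
--     source_lower = source_text.lower()
--     words = source_text.split()
--     word_starts: list[int] = []
--     pos = 0
--     for w in words:
--         idx = source_lower.find(w.lower(), pos)
--         word_starts.append(idx if idx >= 0 else pos)
--         pos = (idx if idx >= 0 else pos) + len(w)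
--
--     windows: list[str] = []
--     seen_centers: set[int] = set()
--
--     for term in terms:
--         start = 0
--         while True:
--             idx = source_lower.find(term, start)
--             if idx == -1:
--                 break
--             # Find the word index closest to this character position
--             center_word = 0
--             for wi, ws in enumerate(word_starts):
--                 if ws <= idx:
--                     center_word = wi
--                 else:
--                     break
--
--             # Avoid duplicate overlapping windows
--             bucket = center_word // (window_size // 2)
--             if bucket not in seen_centers:
--                 seen_centers.add(bucket)
--                 lo = max(0, center_word - window_size)
--                 hi = min(len(words), center_word + window_size)
--                 windows.append(" ".join(words[lo:hi]))
--
--             start = idx + len(term)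
--
--     return windows
-- ===== SOURCE B (Python) =====
-- from bisect import bisect_right
--
--
-- def _word_starts(source_lower, words):
--     starts = []
--     pos = 0
--     for w in words:
--         i = source_lower.find(w.lower(), pos)
--         if i < 0:
--             i = pos
--         starts.append(i)
--         pos = i + len(w)
--     return starts
--
--
-- def _occurrences(source_lower, term):
--     out = []
--     start = 0
--     while True:
--         i = source_lower.find(term, start)
--         if i == -1:
--             return out
--         out.append(i)
--         start = i + len(term)
--
--
-- def _find_term_windows(source_text, terms, window_size=50):
--     source_lower = source_text.lower()
--     words = source_text.split()
--     word_starts = _word_starts(source_lower, words)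
--     half = window_size // 2
--     windows = []
--     seen = set()
--     for term in terms:
--         for idx in _occurrences(source_lower, term):
--             center = bisect_right(word_starts, idx) - 1
--             if center < 0:
--                 center = 0
--             bucket = center // half
--             if bucket not in seen:
--                 seen.add(bucket)
--                 windows.append(" ".join(words[max(0, center - window_size):center + window_size]))
--     return windows
-- ===== Notes on version B (the rewrite author's own statement) =====
-- stated objective: alternative
-- what changed: The O(W) linear scan over word_starts done for every term occurrence is replaced by bisect_right binary search on the nondecreasing word_starts list, and occurrences of each term are materialised by a helper list and folded over; measured ~1.4x at the largest timing size (shared str.find scanning dominates), so no speed claim.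
import Mathlib
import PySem

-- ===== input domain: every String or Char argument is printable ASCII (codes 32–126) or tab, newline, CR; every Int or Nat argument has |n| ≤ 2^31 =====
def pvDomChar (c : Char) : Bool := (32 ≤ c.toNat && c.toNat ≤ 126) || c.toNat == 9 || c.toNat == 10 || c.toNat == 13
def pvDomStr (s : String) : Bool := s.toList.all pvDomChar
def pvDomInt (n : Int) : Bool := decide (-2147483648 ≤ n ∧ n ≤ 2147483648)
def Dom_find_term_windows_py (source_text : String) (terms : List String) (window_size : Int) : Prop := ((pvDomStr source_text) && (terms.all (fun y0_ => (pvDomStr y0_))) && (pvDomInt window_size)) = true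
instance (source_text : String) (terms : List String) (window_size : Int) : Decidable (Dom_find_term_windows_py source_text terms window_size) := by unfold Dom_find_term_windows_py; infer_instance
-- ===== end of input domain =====

-- B replaces A's per-occurrence linear scan over word_starts by bisect_right on the
-- (nondecreasing) word_starts list, and iterates a materialised occurrence list per term.
-- Return-value equivalence only; neither version mutates its arguments.

-- ===== PORT A =====

-- A's word_starts loop: foldl carrying (pos, starts); starts is appended to.
def aWordStarts (low : List Char) (words : List String) : Int × List Int :=
  words.foldl (fun st w =>
    let idx := PySem.Chars.findFrom low (PySem.Chars.lower w.toList) st.1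
    let v := if 0 ≤ idx then idx else st.1
    (v + PySem.Str.len w, st.2 ++ [v])) (0, [])

-- A's inner `for wi, ws in enumerate(word_starts): if ws <= idx: center_word = wi else break`
def aCenterScan (starts : List Int) (idx : Int) (wi : Int) (c : Int) : Int :=
  match starts with
  | [] => c
  | ws :: rest => if ws ≤ idx then aCenterScan rest idx (wi + 1) wi else c

-- A's `while True` over occurrences of one term; fuel only makes the loop total
-- (low.length + 1 steps always suffice for a nonempty term, see Pre_).
def aTermLoop (low : List Char) (words : List String) (starts : List Int) (wsz : Int)
    (term : List Char) (start : Int) (st : PySem.Set Int × List String) (fuel : Nat) :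
    PySem.Set Int × List String :=
  match fuel with
  | 0 => st
  | fuel + 1 =>
    let idx := PySem.Chars.findFrom low term start
    if idx = -1 then st
    else
      let center := aCenterScan starts idx 0 0
      let bucket := PySem.Int.floordiv center (PySem.Int.floordiv wsz 2)
      let st' :=
        if st.1.contains bucket then st
        else
          (st.1.add bucket,
           st.2 ++ [PySem.Str.join " " (PySem.List.slice words
             (some (max 0 (center - wsz))) (some (min (words.length : Int) (center + wsz))))])
      aTermLoop low words starts wsz term (idx + term.length) st' fuel

def find_term_windows_py (source_text : String) (terms : List String) (window_size : Int) : List String :=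
  let low := PySem.Chars.lower source_text.toList
  let words := PySem.Str.split₀ source_text
  let starts := (aWordStarts low words).2
  let fuel := low.length + 1
  (terms.foldl (fun st term => aTermLoop low words starts window_size term.toList 0 st fuel)
    (PySem.Set.empty, [])).2

-- ===== PORT B =====

-- B's _word_starts: direct recursion producing the list.
def bWordStarts (low : List Char) (words : List String) (pos : Int) : List Int :=
  match words with
  | [] => []
  | w :: rest =>
    let i := PySem.Chars.findFrom low (PySem.Chars.lower w.toList) pos
    let i' := if i < 0 then pos else i
    i' :: bWordStarts low rest (i' + PySem.Str.len w)

-- B's _occurrences: the list of match positions of term (fuel only makes the while-loop total).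
def bOccurrences (low : List Char) (term : List Char) (start : Int) (fuel : Nat) : List Int :=
  match fuel with
  | 0 => []
  | fuel + 1 =>
    let i := PySem.Chars.findFrom low term start
    if i = -1 then [] else i :: bOccurrences low term (i + term.length) fuel

-- B's loop body for one occurrence index: bisect_right instead of a scan.
def bStep (words : List String) (starts : List Int) (wsz half : Int)
    (st : PySem.Set Int × List String) (idx : Int) : PySem.Set Int × List String :=
  let c := (PySem.List.bisectRight starts idx : Int) - 1
  let center := if c < 0 then 0 else c
  let bucket := PySem.Int.floordiv center half
  if st.1.contains bucket then st
  else
    (st.1.add bucket,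
     st.2 ++ [PySem.Str.join " " (PySem.List.slice words
       (some (max 0 (center - wsz))) (some (center + wsz)))])

def find_term_windows_py_alt (source_text : String) (terms : List String) (window_size : Int) : List String :=
  let low := PySem.Chars.lower source_text.toList
  let words := PySem.Str.split₀ source_text
  let starts := bWordStarts low words 0
  let half := PySem.Int.floordiv window_size 2
  let fuel := low.length + 1
  (terms.foldl (fun st term =>
      (bOccurrences low term.toList 0 fuel).foldl (bStep words starts window_size half) st)
    (PySem.Set.empty, [])).2

-- ===== PRECONDITION & SPEC =====
-- Pre_ excludes inputs where the Python A does not return: an empty term makes A's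
-- `while True` loop forever (find('', start) = start), and window_size ∈ {0,1}
-- (window_size // 2 = 0) raises ZeroDivisionError as soon as any term occurs in the
-- lowered text; no input on which A returns is excluded.
def Pre_find_term_windows_py (source_text : String) (terms : List String) (window_size : Int) : Prop :=
  (∀ t ∈ terms, t ≠ "") ∧
  (PySem.Int.floordiv window_size 2 ≠ 0 ∨
    ∀ t ∈ terms, PySem.Str.isIn t (PySem.Str.lower source_text) = false)
instance (source_text : String) (terms : List String) (window_size : Int) : Decidable (Pre_find_term_windows_py source_text terms window_size) := by unfold Pre_find_term_windows_py; infer_instance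

def pvWitness_find_term_windows_py : String × List String × Int := ("Foo bar baz foo qux", ["foo", "bar"], 4)

def Spec_find_term_windows_py (source_text : String) (terms : List String) (window_size : Int) (out : List String) : Prop := out = find_term_windows_py_alt source_text terms window_size
instance (source_text : String) (terms : List String) (window_size : Int) (out : List String) : Decidable (Spec_find_term_windows_py source_text terms window_size out) := by unfold Spec_find_term_windows_py; infer_instance

-- ===== CLAIM (what is proved, stated in full; the proofs are below) =====
def Claim_equal_find_term_windows_py : Prop := ∀ (source_text : String) (terms : List String) (window_size : Int), Dom_find_term_windows_py source_text terms window_size → Pre_find_term_windows_py source_text terms window_size → Spec_find_term_windows_py source_text terms window_size (find_term_windows_py source_text terms window_size)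

-- ===== LEMMAS AND PROOFS =====

-- find(sub, start) returns -1 or a position ≥ start (for 0 ≤ start).
theorem findFrom_ge (s sub : List Char) (start : Int) (h0 : 0 ≤ start)
    (h : ¬ PySem.Chars.findFrom s sub start < 0) :
    start ≤ PySem.Chars.findFrom s sub start := by
  have hf := PySem.Chars.neg_one_le_find (List.drop start.toNat (List.take ((s.length : Int)).toNat s)) sub
  simp only [PySem.Chars.findFrom] at h ⊢
  split_ifs at h ⊢ with h1 h2 h3 <;> omega

-- A's word_starts foldl produces exactly B's recursive list.
theorem aWordStarts_eq (low : List Char) (words : List String) :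
    ∀ (pos : Int) (acc : List Int),
      (words.foldl (fun st w =>
        let idx := PySem.Chars.findFrom low (PySem.Chars.lower w.toList) st.1
        let v := if 0 ≤ idx then idx else st.1
        (v + PySem.Str.len w, st.2 ++ [v])) (pos, acc)).2
      = acc ++ bWordStarts low words pos := by
  induction words with
  | nil => intro pos acc; simp [bWordStarts]
  | cons w rest ih =>
    intro pos acc
    simp only [List.foldl_cons, bWordStarts]
    rw [ih]
    have : (if 0 ≤ PySem.Chars.findFrom low (PySem.Chars.lower w.toList) pos
            then PySem.Chars.findFrom low (PySem.Chars.lower w.toList) pos else pos)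
         = (if PySem.Chars.findFrom low (PySem.Chars.lower w.toList) pos < 0
            then pos else PySem.Chars.findFrom low (PySem.Chars.lower w.toList) pos) := by
      split_ifs <;> omega
    simp [this]

-- word lengths are nonnegative
theorem strLen_nonneg (w : String) : 0 ≤ PySem.Str.len w := by
  simp [PySem.Str.len_eq]

-- B's word_starts list is nondecreasing and bounded below by pos.
theorem bWordStarts_sorted (low : List Char) (words : List String) :
    ∀ (pos : Int), 0 ≤ pos →
      List.Pairwise (· ≤ ·) (bWordStarts low words pos) ∧
      ∀ x ∈ bWordStarts low words pos, pos ≤ x := by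
  induction words with
  | nil => intro pos _; simp [bWordStarts]
  | cons w rest ih =>
    intro pos hpos
    simp only [bWordStarts]
    set i := PySem.Chars.findFrom low (PySem.Chars.lower w.toList) pos with hi
    set i' := (if i < 0 then pos else i) with hi'
    have hpi : pos ≤ i' := by
      by_cases hc : i < 0
      · simp [hi', hc]
      · simp only [hi', if_neg hc]
        exact findFrom_ge low _ pos hpos hc
    have hlen := strLen_nonneg w
    have h0 : 0 ≤ i' + PySem.Str.len w := by omega
    obtain ⟨hs, hb⟩ := ih (i' + PySem.Str.len w) h0
    refine ⟨List.pairwise_cons.mpr ⟨fun x hx => ?_, hs⟩, ?_⟩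
    · have := hb x hx; omega
    · intro x hx
      rcases List.mem_cons.mp hx with h | h
      · omega
      · have := hb x h; omega

-- A's break-scan over a nondecreasing list computes bisect_right − 1 (clamped at 0).
theorem aCenterScan_spec (starts : List Int) (idx : Int) (b : Nat)
    (hb : b ≤ starts.length)
    (hle : ∀ (j : Nat) (hj : j < starts.length), j < b → starts[j] ≤ idx)
    (hgt : ∀ (j : Nat) (hj : j < starts.length), b ≤ j → idx < starts[j]) :
    ∀ (wi c : Int), aCenterScan starts idx wi c = if b = 0 then c else wi + b - 1 := by
  induction starts generalizing b with
  | nil =>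
    intro wi c
    simp at hb
    simp [aCenterScan, hb]
  | cons ws rest ih =>
    intro wi c
    simp only [aCenterScan]
    by_cases hcase : ws ≤ idx
    · have hbne : b ≠ 0 := by
        intro h0
        have := hgt 0 (by simp) (by omega)
        simp at this; omega
      obtain ⟨b', rfl⟩ : ∃ b', b = b' + 1 := ⟨b - 1, by omega⟩
      rw [if_pos hcase]
      rw [ih b' (by simpa using hb)
        (fun j hj hjb => by
          have := hle (j + 1) (by simpa using Nat.succ_lt_succ hj) (by omega)
          simpa using this)
        (fun j hj hjb => by
          have := hgt (j + 1) (by simpa using Nat.succ_lt_succ hj) (by omega)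
          simpa using this)]
      split_ifs <;> (try exact ‹False›.elim) <;> push_cast <;> omega
    · have hb0 : b = 0 := by
        by_contra hne
        have := hle 0 (by simp) (by omega)
        simp at this; omega
      rw [if_neg hcase]
      simp [hb0]

-- the two centre computations agree on a nondecreasing starts list
theorem center_eq (starts : List Int) (idx : Int)
    (hs : List.Pairwise (· ≤ ·) starts) :
    aCenterScan starts idx 0 0
      = (if (PySem.List.bisectRight starts idx : Int) - 1 < 0 then 0
         else (PySem.List.bisectRight starts idx : Int) - 1) := by
  obtain ⟨h1, h2, h3⟩ := PySem.List.bisectRight_spec starts idx hs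
  rw [aCenterScan_spec starts idx (PySem.List.bisectRight starts idx) h1 h2 h3 0 0]
  split_ifs <;> omega

-- dropping Python's min(len(words), hi) slice bound is harmless: slice clamps the stop bound
theorem clampIdx_min_self (n : Nat) (h : Int) :
    PySem.List.clampIdx n (min (n : Int) h) = PySem.List.clampIdx n h := by
  simp only [PySem.List.clampIdx]; split_ifs <;> omega

theorem slice_min_stop {α : Type} (xs : List α) (lo hi : Int) :
    PySem.List.slice xs (some lo) (some (min (xs.length : Int) hi))
      = PySem.List.slice xs (some lo) (some hi) := by
  simp only [PySem.List.slice, clampIdx_min_self]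

-- one loop body of A equals B's bStep (sorted starts)
theorem step_eq (words : List String) (starts : List Int) (wsz : Int)
    (hs : List.Pairwise (· ≤ ·) starts) (st : PySem.Set Int × List String) (idx : Int) :
    (let center := aCenterScan starts idx 0 0
     let bucket := PySem.Int.floordiv center (PySem.Int.floordiv wsz 2)
     if st.1.contains bucket then st
     else
       (st.1.add bucket,
        st.2 ++ [PySem.Str.join " " (PySem.List.slice words
          (some (max 0 (center - wsz))) (some (min (words.length : Int) (center + wsz))))]))
    = bStep words starts wsz (PySem.Int.floordiv wsz 2) st idx := by
  simp only [bStep, center_eq starts idx hs, slice_min_stop]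

-- A's while-loop over one term equals B's fold over the occurrence list (same fuel)
theorem termLoop_eq (low : List Char) (words : List String) (starts : List Int) (wsz : Int)
    (hs : List.Pairwise (· ≤ ·) starts) (term : List Char) :
    ∀ (fuel : Nat) (start : Int) (st : PySem.Set Int × List String),
      aTermLoop low words starts wsz term start st fuel
        = (bOccurrences low term start fuel).foldl
            (bStep words starts wsz (PySem.Int.floordiv wsz 2)) st := by
  intro fuel
  induction fuel with
  | zero => intro start st; simp [aTermLoop, bOccurrences]
  | succ n ih =>
    intro start st
    simp only [aTermLoop, bOccurrences]
    by_cases hidx : PySem.Chars.findFrom low term start = -1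
    · simp [hidx]
    · rw [if_neg hidx, if_neg hidx, List.foldl_cons, ← ih, ← step_eq words starts wsz hs st]

-- ===== VERDICT (by name: the statement is the Claim_ definition above) =====
theorem find_term_windows_py_spec : Claim_equal_find_term_windows_py := by
  intro source_text terms window_size _ _
  unfold Spec_find_term_windows_py find_term_windows_py find_term_windows_py_alt
  simp only
  rw [show (aWordStarts (PySem.Chars.lower source_text.toList) (PySem.Str.split₀ source_text)).2
        = bWordStarts (PySem.Chars.lower source_text.toList) (PySem.Str.split₀ source_text) 0 from by
      simpa using aWordStarts_eq (PySem.Chars.lower source_text.toList) (PySem.Str.split₀ source_text) 0 []]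
  have hs := (bWordStarts_sorted (PySem.Chars.lower source_text.toList)
    (PySem.Str.split₀ source_text) 0 le_rfl).1
  congr 1
  apply PySem.List.foldl_congr_mem
  intro st term _
  exact termLoop_eq _ _ _ _ hs term.toList _ 0 st
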